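-- pv_equiv track=rewrite | github.com/DeXoteric/codewars-py | 7 kyu/Printer Errors/main.py | printer_error
-- ===== SOURCE A (Python) =====
-- def printer_error(s):
--     colors = list(map(chr, range(ord("a"), ord("m") + 1)))
--     errors = 0
--     input_length = len(s)
--     s = list(s)
--     for i in s:
--         if i not in colors:
--             errors += 1
--
--     return f"{errors}/{input_length}"
-- ===== SOURCE B (Python) =====
-- def printer_error(s):
--     freq = {}
--     for c in s:
--         freq[c] = freq.get(c, 0) + 1
--     errors = sum(n for c, n in freq.items() if c < 'a' or 'm' < c)
--     return f"{errors}/{len(s)}"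
-- ===== Notes on version B (the rewrite author's own statement) =====
-- stated objective: alternative
-- what changed: B replaces A's per-character membership test against a materialised list of the 13 good colors by building a character-frequency dict in one pass and summing the counts of the distinct characters outside the good a-to-m range via order comparisons.
import Mathlib
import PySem

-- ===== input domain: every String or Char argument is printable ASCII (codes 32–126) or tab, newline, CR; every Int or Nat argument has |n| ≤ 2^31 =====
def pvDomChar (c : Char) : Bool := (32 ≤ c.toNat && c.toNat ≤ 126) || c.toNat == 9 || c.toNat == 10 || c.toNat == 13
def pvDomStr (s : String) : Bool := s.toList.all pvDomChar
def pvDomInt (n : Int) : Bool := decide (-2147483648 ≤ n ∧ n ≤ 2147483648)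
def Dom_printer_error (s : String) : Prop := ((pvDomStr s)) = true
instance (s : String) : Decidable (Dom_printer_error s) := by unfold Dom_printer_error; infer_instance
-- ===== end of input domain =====

-- B builds a frequency dict in one pass and sums the counts of the bad (non 'a'..'m') characters,
-- instead of A's per-character membership test against a materialised list of the 13 good colors.

-- ===== PORT A =====
def printer_error (s : String) : String :=
  -- colors = list(map(chr, range(ord("a"), ord("m") + 1)))
  let colors : List Char := (PySem.List.pyRange 97 (109 + 1) 1).map (fun n => Char.ofNat n.toNat)
  -- errors = 0; for i in list(s): if i not in colors: errors += 1
  let errors : Int := s.toList.foldl (fun errors i => if i ∉ colors then errors + 1 else errors) 0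
  PySem.Int.toStr errors ++ "/" ++ PySem.Int.toStr (PySem.Str.len s)

-- ===== PORT B =====
def printer_error_alt (s : String) : String :=
  -- freq = {}; for c in s: freq[c] = freq.get(c, 0) + 1
  let freq : PySem.Dict Char Int :=
    s.toList.foldl (fun d c => d.insert c (d.getD c 0 + 1)) PySem.Dict.empty
  -- errors = sum(n for c, n in freq.items() if c < 'a' or 'm' < c)
  let errors : Int :=
    freq.items.foldl (fun acc p => if p.1 < 'a' ∨ 'm' < p.1 then acc + p.2 else acc) 0
  PySem.Int.toStr errors ++ "/" ++ PySem.Int.toStr (PySem.Str.len s)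

-- ===== PRECONDITION & SPEC =====
def Spec_printer_error (s : String) (out : String) : Prop := out = printer_error_alt s
instance (s : String) (out : String) : Decidable (Spec_printer_error s out) := by unfold Spec_printer_error; infer_instance

-- ===== CLAIM (what is proved, stated in full; the proofs are below) =====
def Claim_equal_printer_error : Prop := ∀ (s : String), Dom_printer_error s → Spec_printer_error s (printer_error s)

-- ===== LEMMAS AND PROOFS =====

lemma char_ofNat_toNat (n : Nat) (h : n < 55296) : (Char.ofNat n).toNat = n := by
  have hv : Nat.isValidChar n := Or.inl h
  unfold Char.ofNat
  rw [dif_pos hv]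
  unfold Char.ofNatAux Char.toNat
  simp

-- membership in A's colors list ↔ the character code lies in 97..109
lemma mem_colors (c : Char) :
    c ∈ (PySem.List.pyRange 97 (109 + 1) 1).map (fun n => Char.ofNat n.toNat) ↔
      97 ≤ c.toNat ∧ c.toNat ≤ 109 := by
  simp only [List.mem_map, PySem.List.mem_pyRange_one]
  constructor
  · rintro ⟨n, ⟨h1, h2⟩, rfl⟩
    rw [char_ofNat_toNat n.toNat (by omega)]
    omega
  · rintro ⟨h1, h2⟩
    refine ⟨(c.toNat : Int), ⟨by omega, by omega⟩, ?_⟩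
    apply Char.ext
    have := char_ofNat_toNat ((c.toNat : Int).toNat) (by omega)
    have h3 : ((c.toNat : Int)).toNat = c.toNat := by omega
    rw [h3] at this
    exact UInt32.toNat_inj.mp this

-- the two tests agree pointwise (Char < is code-point < definitionally)
lemma bad_iff (c : Char) :
    (c < 'a' ∨ 'm' < c) ↔ ¬ (97 ≤ c.toNat ∧ c.toNat ≤ 109) := by
  have h1 : c < 'a' ↔ c.toNat < 97 := Iff.rfl
  have h2 : 'm' < c ↔ 109 < c.toNat := Iff.rfl
  rw [h1, h2]; omega

-- generic: a conditional-accumulating foldl is acc + sum of a 0/else map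
lemma foldl_ite_add {α : Type} (P : α → Prop) [DecidablePred P] (f : α → Int) :
    ∀ (l : List α) (a : Int),
      l.foldl (fun acc x => if P x then acc + f x else acc) a
        = a + (l.map (fun x => if P x then f x else 0)).sum := by
  intro l
  induction l with
  | nil => simp
  | cons x l ih =>
    intro a
    by_cases h : P x <;> simp [h, ih, add_assoc]

-- sum of an ite map equals sum over the filtered list
lemma sum_map_ite_eq_filter {α : Type} (p : α → Bool) (f : α → Int) (l : List α) :
    (l.map (fun x => if p x then f x else 0)).sum = ((l.filter p).map f).sum := by
  induction l with
  | nil => rfl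
  | cons x l ih =>
    by_cases h : p x <;> simp [h, ih]

-- summing counts of the bad distinct characters = counting bad characters
lemma sum_counts_eq_countP (p : Char → Bool) (l ks : List Char)
    (hnd : ks.Nodup) (hmem : ∀ x, x ∈ ks ↔ x ∈ l) :
    (ks.map (fun k => if p k then (l.count k : Int) else 0)).sum = (l.countP p : Int) := by
  have hperm : List.Perm ks l.dedup := by
    rw [List.perm_ext_iff_of_nodup hnd l.nodup_dedup]
    intro a; rw [hmem, List.mem_dedup]
  calc (ks.map (fun k => if p k then (l.count k : Int) else 0)).sum
      = ((l.dedup.map (fun k => if p k then (l.count k : Int) else 0))).sum :=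
        (hperm.map _).sum_eq
    _ = ((l.dedup.filter p).map (fun k => (l.count k : Int))).sum :=
        sum_map_ite_eq_filter p _ _
    _ = (((l.dedup.filter p).map l.count).sum : Int) := by
        rw [Nat.cast_list_sum, List.map_map]
        rfl
    _ = (l.countP p : Int) := by
        rw [List.sum_map_count_dedup_filter_eq_countP]

-- ===== VERDICT (by name: the statement is the Claim_ definition above) =====
theorem printer_error_spec : Claim_equal_printer_error := by
  intro s _
  unfold Spec_printer_error printer_error printer_error_alt
  simp only []
  set l := s.toList with hl
  have hB : l.foldl (fun d c => d.insert c (d.getD c 0 + 1)) PySem.Dict.empty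
      = PySem.Dict.counter l := PySem.Dict.foldl_insert_getD_add_one_eq_counter l
  rw [hB, PySem.Dict.items_counter]
  congr 2
  -- both error counts equal countP of the same bad test
  have hA : l.foldl (fun errors i =>
      if i ∉ (PySem.List.pyRange 97 (109 + 1) 1).map (fun n => Char.ofNat n.toNat)
      then errors + 1 else errors) 0
      = (l.countP (fun c => decide (c < 'a' ∨ 'm' < c)) : Int) := by
    rw [PySem.List.foldl_ite_add_one, zero_add]
    congr 1
    apply List.countP_congr
    intro c _
    simp only [decide_eq_true_eq]
    rw [bad_iff]
    exact not_congr (mem_colors c)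
  rw [hA]
  rw [foldl_ite_add (fun p : Char × Int => p.1 < 'a' ∨ 'm' < p.1) (fun p => p.2)]
  rw [List.map_map]
  have hfun : ((fun p : Char × Int => if p.1 < 'a' ∨ 'm' < p.1 then p.2 else 0) ∘
      fun k => (k, (l.count k : Int)))
      = fun k => if (fun c => decide (c < 'a' ∨ 'm' < c)) k then (l.count k : Int) else 0 := by
    funext k; simp
  rw [hfun, sum_counts_eq_countP _ l _ (PySem.Set.nodup_ofList l)
    (fun x => PySem.Set.mem_ofList l x)]
  simp
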